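-- pv_equiv track=rewrite | github.com/pypi-data/pypi-mirror-66 | packages/nvhtml/nvhtml-0.0.44.tar.gz/nvhtml-0.0.44/nvhtml/rshtml.py | group_by_depth
-- ===== SOURCE A (Python) =====
-- def group_by_depth(unpacked_lines):
--     d = {}
--     for each in unpacked_lines:
--         depth = each["depth"]
--         if(depth in d):
--             d[depth].append(each)
--         else:
--             d[depth] = [each]
--     return(d)
-- ===== SOURCE B (Python) =====
-- def group_by_depth(unpacked_lines):
--     keys = list(dict.fromkeys(e["depth"] for e in unpacked_lines))
--     return {k: [e for e in unpacked_lines if e["depth"] == k] for k in keys}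
-- ===== Notes on version B (the rewrite author's own statement) =====
-- stated objective: alternative
-- what changed: B replaces A's single hashing pass that appends into mutable buckets by a two-phase plan: first dedup the depth keys in first-occurrence order (dict.fromkeys), then build each bucket with an independent filter pass over the input.
import Mathlib
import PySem

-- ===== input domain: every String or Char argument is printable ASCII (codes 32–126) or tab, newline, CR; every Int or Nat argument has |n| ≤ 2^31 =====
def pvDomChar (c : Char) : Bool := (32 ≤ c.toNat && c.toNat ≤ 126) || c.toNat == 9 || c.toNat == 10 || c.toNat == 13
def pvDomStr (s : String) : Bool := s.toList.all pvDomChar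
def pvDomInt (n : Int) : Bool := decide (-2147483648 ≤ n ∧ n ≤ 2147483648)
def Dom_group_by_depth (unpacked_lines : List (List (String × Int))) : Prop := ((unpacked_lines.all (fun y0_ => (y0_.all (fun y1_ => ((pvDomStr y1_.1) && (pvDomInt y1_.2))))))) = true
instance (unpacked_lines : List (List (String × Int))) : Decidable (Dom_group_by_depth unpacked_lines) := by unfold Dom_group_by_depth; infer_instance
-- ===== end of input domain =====

-- ===== PORT A =====
-- B changes A's one hashing pass with mutable buckets into dedup-keys-then-filter-per-key (alternative decomposition, not faster).
-- e["depth"] for both ports: first-match lookup; KeyError (no "depth" key) is excluded by Pre_ below, 0 is a free default there.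
def pyDepth (e : List (String × Int)) : Int := ((PySem.Dict.mk e).get? "depth").getD 0

def group_by_depth (unpacked_lines : List (List (String × Int))) : List (Int × List (List (String × Int))) :=
  (unpacked_lines.foldl
    (fun (d : PySem.Dict Int (List (List (String × Int)))) each =>
      let depth := pyDepth each
      if d.contains depth then d.insert depth (d.getD depth [] ++ [each])
      else d.insert depth [each])
    PySem.Dict.empty).items

-- ===== PORT B =====
def group_by_depth_alt (unpacked_lines : List (List (String × Int))) : List (Int × List (List (String × Int))) :=
  (PySem.List.dedup (unpacked_lines.map pyDepth)).map
    (fun k => (k, unpacked_lines.filter (fun e => pyDepth e == k)))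

-- ===== PRECONDITION & SPEC =====
-- Pre_ excludes exactly the inputs where some element has no "depth" key: there Python's each["depth"] raises KeyError.
def Pre_group_by_depth (unpacked_lines : List (List (String × Int))) : Prop :=
  ∀ e ∈ unpacked_lines, "depth" ∈ e.map Prod.fst
instance (unpacked_lines : List (List (String × Int))) : Decidable (Pre_group_by_depth unpacked_lines) := by unfold Pre_group_by_depth; infer_instance
def pvWitness_group_by_depth : (List (List (String × Int))) := [[("depth", 1), ("tag", 7)], [("depth", 0)], [("depth", 1)]]
def Spec_group_by_depth (unpacked_lines : List (List (String × Int))) (out : List (Int × List (List (String × Int)))) : Prop := out = group_by_depth_alt unpacked_lines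
instance (unpacked_lines : List (List (String × Int))) (out : List (Int × List (List (String × Int)))) : Decidable (Spec_group_by_depth unpacked_lines out) := by unfold Spec_group_by_depth; infer_instance

-- ===== CLAIM (what is proved, stated in full; the proofs are below) =====
def Claim_equal_group_by_depth : Prop := ∀ (unpacked_lines : List (List (String × Int))), Dom_group_by_depth unpacked_lines → Pre_group_by_depth unpacked_lines → Spec_group_by_depth unpacked_lines (group_by_depth unpacked_lines)

-- ===== LEMMAS AND PROOFS =====

-- A's loop step is exactly Dict.modify with default [].
theorem stepA_eq_modify (d : PySem.Dict Int (List (List (String × Int)))) (each : List (String × Int)) :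
    (let depth := pyDepth each
     if d.contains depth then d.insert depth (d.getD depth [] ++ [each])
     else d.insert depth [each])
    = d.modify (pyDepth each) [] (· ++ [each]) := by
  simp only [PySem.Dict.modify]
  by_cases h : d.contains (pyDepth each) = true
  · simp [h]
  · simp only [Bool.not_eq_true] at h
    simp [h, PySem.Dict.getD_of_not_contains d [] h]

-- keys of the modify-fold: first-occurrence dedup of the modified keys, appended to d.keys.
theorem keys_foldl_modify_pairs (l : List (Int × List (String × Int)))
    (d : PySem.Dict Int (List (List (String × Int)))) :
    (l.foldl (fun d p => d.modify p.1 [] (· ++ [p.2])) d).keys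
      = PySem.Set.update d.keys (l.map Prod.fst) := by
  induction l generalizing d with
  | nil => rfl
  | cons p l ih =>
      simp only [List.foldl_cons, List.map_cons, PySem.Set.update, List.foldl_cons]
      rw [ih]
      have hk : (d.modify p.1 [] (· ++ [p.2])).keys = PySem.Set.add d.keys p.1 := by
        rw [PySem.Dict.keys_modify]
        by_cases h : d.contains p.1 = true
        · rw [PySem.Dict.keys_insert_of_contains _ _ h]
          simp [PySem.Set.add, (PySem.Dict.contains_iff_mem_keys d p.1).mp h]
        · simp only [Bool.not_eq_true] at h
          rw [PySem.Dict.keys_insert_of_not_contains _ _ h]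
          have : ¬ p.1 ∈ d.keys := fun hm => by
            simp [(PySem.Dict.contains_iff_mem_keys d p.1).mpr hm] at h
          simp [PySem.Set.add, this]
      rw [hk]; rfl

theorem nodup_keys_foldl_modify_pairs (l : List (Int × List (String × Int)))
    (d : PySem.Dict Int (List (List (String × Int)))) (h : d.keys.Nodup) :
    (l.foldl (fun d p => d.modify p.1 [] (· ++ [p.2])) d).keys.Nodup := by
  induction l generalizing d with
  | nil => exact h
  | cons p l ih =>
      refine ih _ ?_
      rw [PySem.Dict.keys_modify]
      exact PySem.Dict.nodup_keys_insert _ _ _ h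

-- A dict with nodup keys is the list of (key, value-at-key) pairs over its keys.
theorem items_eq_keys_map {v : Type} (items : List (Int × v)) (h : (items.map Prod.fst).Nodup) (d0 : v) :
    items = (items.map Prod.fst).map (fun k => (k, (PySem.Dict.mk items).getD k d0)) := by
  induction items with
  | nil => rfl
  | cons p rest ih =>
      obtain ⟨k0, w⟩ := p
      obtain ⟨hne, hnd⟩ := List.nodup_cons.mp h
      simp only [List.map_cons]
      rw [List.cons_eq_cons]
      refine ⟨?_, ?_⟩
      · simp [PySem.Dict.getD, PySem.Dict.get?_mk_cons]
      · have htail : (rest.map Prod.fst).map (fun k => (k, (PySem.Dict.mk ((k0, w) :: rest)).getD k d0))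
            = (rest.map Prod.fst).map (fun k => (k, (PySem.Dict.mk rest).getD k d0)) := by
          apply List.map_congr_left
          intro k hk
          have hkne : (k0 == k) = false := by
            simp only [beq_eq_false_iff_ne, ne_eq]
            intro he; exact hne (he ▸ hk)
          simp [PySem.Dict.getD, PySem.Dict.get?_mk_cons, hkne]
        rw [htail]
        exact ih hnd

-- filter-of-pairs back to filter on the original list.
theorem filter_pairs_eq (xs : List (List (String × Int))) (k : Int) :
    ((xs.map (fun e => (pyDepth e, e))).filter (fun p => p.1 == k)).map (fun p => p.2)
      = xs.filter (fun e => pyDepth e == k) := by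
  rw [List.filter_map, List.map_map]
  simp [Function.comp_def]

-- ===== VERDICT (by name: the statement is the Claim_ definition above) =====
theorem group_by_depth_spec : Claim_equal_group_by_depth := by
  intro xs _ _
  unfold Spec_group_by_depth group_by_depth group_by_depth_alt
  have hstep : (xs.foldl
      (fun (d : PySem.Dict Int (List (List (String × Int)))) each =>
        let depth := pyDepth each
        if d.contains depth then d.insert depth (d.getD depth [] ++ [each])
        else d.insert depth [each]) PySem.Dict.empty)
      = ((xs.map (fun e => (pyDepth e, e))).foldl
          (fun d p => d.modify p.1 [] (· ++ [p.2])) PySem.Dict.empty) := by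
    rw [List.foldl_map]
    congr 1
    funext d e
    exact stepA_eq_modify d e
  rw [hstep]
  set D := (xs.map (fun e => (pyDepth e, e))).foldl
      (fun d p => d.modify p.1 [] (· ++ [p.2])) PySem.Dict.empty with hD
  have hkeys : D.keys = PySem.List.dedup (xs.map pyDepth) := by
    rw [hD, keys_foldl_modify_pairs]
    simp [PySem.Dict.keys_empty, PySem.Set.update, PySem.Set.ofList, PySem.List.dedup,
      PySem.Set.empty, List.map_map, Function.comp_def]
  have hnodup : D.keys.Nodup :=
    nodup_keys_foldl_modify_pairs _ _ PySem.Dict.nodup_keys_empty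
  have hgetD : ∀ k, D.getD k [] = xs.filter (fun e => pyDepth e == k) := by
    intro k
    rw [hD, PySem.Dict.getD_foldl_modify_append]
    rw [filter_pairs_eq]
    simp [PySem.Dict.getD_empty]
  have := items_eq_keys_map D.items (by simpa [PySem.Dict.keys] using hnodup) ([] : List (List (String × Int)))
  calc D.items = (D.items.map Prod.fst).map (fun k => (k, (PySem.Dict.mk D.items).getD k [])) := this
    _ = (PySem.List.dedup (xs.map pyDepth)).map (fun k => (k, xs.filter (fun e => pyDepth e == k))) := by
        have hk : D.items.map Prod.fst = PySem.List.dedup (xs.map pyDepth) := hkeys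
        rw [hk]
        apply List.map_congr_left
        intro k _
        have : (PySem.Dict.mk D.items) = D := rfl
        rw [this, hgetD k]
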